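-- pv_equiv track=rewrite | github.com/mostafahelmy1259/BYUCTF-2025 | Anaken21sec1_solution.py | inverse_rearrange
-- ===== SOURCE A (Python) =====
-- def inverse_rearrange(ciphertext, keyNums):
--     reducedKeyNums = []
--     [reducedKeyNums.append(x) for x in keyNums if x not in reducedKeyNums]
--
--     n = len(reducedKeyNums)
--     letterBoxes = [[] for _ in range(n)]
--     lengths = [0]*n
--
--     # Calculate how many letters in each box
--     for i in range(len(ciphertext)):
--         lengths[i % n] += 1
--
--     # Split ciphertext according to sorted keyNums
--     sortedKeyNums = sorted(reducedKeyNums)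
--     pos = 0
--     boxes_in_order = []
--     for k in sortedKeyNums:
--         idx = reducedKeyNums.index(k)
--         length = lengths[idx]
--         boxes_in_order.append(ciphertext[pos:pos+length])
--         pos += length
--
--     # Put boxes back to original order
--     for i, k in enumerate(sortedKeyNums):
--         idx = reducedKeyNums.index(k)
--         letterBoxes[idx] = list(boxes_in_order[i])
--
--     # Rebuild original text by reading in round robin order
--     plaintext = []
--     for i in range(len(ciphertext)):
--         box_idx = i % n
--         plaintext.append(letterBoxes[box_idx].pop(0))
--     return "".join(plaintext)
-- ===== SOURCE B (Python) =====
-- def inverse_rearrange(ciphertext, keyNums):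
--     reduced = list(dict.fromkeys(keyNums))
--     n = len(reduced)
--     lengths = [0] * n
--     for i in range(len(ciphertext)):
--         lengths[i % n] += 1
--     offset = [0] * n
--     pos = 0
--     for k in sorted(reduced):
--         idx = reduced.index(k)
--         offset[idx] = pos
--         pos += lengths[idx]
--     return ''.join(ciphertext[offset[i % n] + i // n] for i in range(len(ciphertext)))
-- ===== Notes on version B (the rewrite author's own statement) =====
-- stated objective: faster
-- what changed: Replaces A's split-into-boxes plus round-robin pop(0) simulation with an offset table per original column and a direct index formula ciphertext[offset[i % n] + i // n] for each output position.
import Mathlib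
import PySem

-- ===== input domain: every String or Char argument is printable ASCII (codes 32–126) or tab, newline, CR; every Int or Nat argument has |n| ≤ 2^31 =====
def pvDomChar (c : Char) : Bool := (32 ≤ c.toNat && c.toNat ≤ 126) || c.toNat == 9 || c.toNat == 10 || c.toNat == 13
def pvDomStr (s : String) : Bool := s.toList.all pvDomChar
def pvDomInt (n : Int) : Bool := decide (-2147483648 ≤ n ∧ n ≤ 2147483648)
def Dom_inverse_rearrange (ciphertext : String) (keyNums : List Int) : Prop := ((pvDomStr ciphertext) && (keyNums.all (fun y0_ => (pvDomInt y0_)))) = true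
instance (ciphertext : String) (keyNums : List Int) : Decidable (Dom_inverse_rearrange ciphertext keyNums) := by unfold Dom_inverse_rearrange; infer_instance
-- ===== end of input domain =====

-- B replaces A's box-splitting + round-robin pop(0) simulation by an offset table and a direct
-- per-position index formula; a timing run measured B faster.

-- ===== PORT A =====
-- Literal port of A. Inside Pre_ every lengths[...] / letterBoxes[...] index is in range and every
-- pop(0) is from a non-empty box, so the getD/headD defaults below are never used there.
def inverse_rearrange (ciphertext : String) (keyNums : List Int) : String :=
  let reducedKeyNums : List Int :=
    keyNums.foldl (fun acc x => if x ∈ acc then acc else acc ++ [x]) []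
  let n := reducedKeyNums.length
  let cs := ciphertext.toList
  let letterBoxes : List (List Char) := List.replicate n []
  let lengths : List Nat :=
    (List.range cs.length).foldl
      (fun ls i => ls.set (i % n) (ls.getD (i % n) 0 + 1)) (List.replicate n 0)
  let sortedKeyNums := PySem.List.sorted reducedKeyNums (fun x => x) false
  let step1 := sortedKeyNums.foldl
    (fun (st : Nat × List (List Char)) k =>
      let idx := (PySem.List.index? reducedKeyNums k).getD 0
      let length := lengths.getD idx 0
      (st.1 + length,
       st.2 ++ [PySem.List.slice cs (some (st.1 : Int)) (some ((st.1 : Int) + (length : Int)))]))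
    (0, [])
  let boxes_in_order := step1.2
  let letterBoxes := (PySem.List.enumerate sortedKeyNums 0).foldl
    (fun lb p =>
      let idx := (PySem.List.index? reducedKeyNums p.2).getD 0
      lb.set idx (boxes_in_order.getD p.1.toNat []))
    letterBoxes
  let step2 := (List.range cs.length).foldl
    (fun (st : List (List Char) × List Char) i =>
      let box_idx := i % n
      let box := st.1.getD box_idx []
      (st.1.set box_idx box.tail, st.2 ++ [box.headD ' ']))
    (letterBoxes, [])
  String.ofList step2.2

-- ===== PORT B =====
-- Literal port of Source B. Inside Pre_ the ciphertext index offset[i % n] + i // n is always in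
-- range, so the getD defaults are never used there.
def inverse_rearrange_alt (ciphertext : String) (keyNums : List Int) : String :=
  let reduced : List Int := PySem.List.dedup keyNums
  let n := reduced.length
  let cs := ciphertext.toList
  let lengths : List Nat :=
    (List.range cs.length).foldl
      (fun ls i => ls.set (i % n) (ls.getD (i % n) 0 + 1)) (List.replicate n 0)
  let step := (PySem.List.sorted reduced (fun x => x) false).foldl
    (fun (st : List Nat × Nat) k =>
      let idx := (PySem.List.index? reduced k).getD 0
      (st.1.set idx st.2, st.2 + lengths.getD idx 0))
    (List.replicate n 0, 0)
  let offset := step.1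
  String.ofList ((List.range cs.length).map
    (fun i => cs.getD (offset.getD (i % n) 0 + i / n) ' '))

-- ===== PRECONDITION & SPEC =====
-- Pre_ excludes only the inputs where A raises ZeroDivisionError (empty key list with a
-- non-empty ciphertext); A returns on every other input.
def Pre_inverse_rearrange (ciphertext : String) (keyNums : List Int) : Prop :=
  keyNums = [] → ciphertext = ""
instance (ciphertext : String) (keyNums : List Int) : Decidable (Pre_inverse_rearrange ciphertext keyNums) := by
  unfold Pre_inverse_rearrange; infer_instance

def pvWitness_inverse_rearrange : String × List Int := ("SECRETMSG", [3, 1, 2])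

def Spec_inverse_rearrange (ciphertext : String) (keyNums : List Int) (out : String) : Prop := out = inverse_rearrange_alt ciphertext keyNums
instance (ciphertext : String) (keyNums : List Int) (out : String) : Decidable (Spec_inverse_rearrange ciphertext keyNums out) := by unfold Spec_inverse_rearrange; infer_instance

-- ===== CLAIM (what is proved, stated in full; the proofs are below) =====
def Claim_equal_inverse_rearrange : Prop := ∀ (ciphertext : String) (keyNums : List Int), Dom_inverse_rearrange ciphertext keyNums → Pre_inverse_rearrange ciphertext keyNums → Spec_inverse_rearrange ciphertext keyNums (inverse_rearrange ciphertext keyNums)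

-- ===== LEMMAS AND PROOFS =====

-- dedupe: A's append-if-not-in loop equals list(dict.fromkeys(..)) ------------
lemma pvDedup_fold (keyNums : List Int) :
    keyNums.foldl (fun acc x => if x ∈ acc then acc else acc ++ [x]) []
      = PySem.List.dedup keyNums := by
  rw [show PySem.List.dedup keyNums = keyNums.foldl PySem.Set.add [] from rfl]
  apply PySem.List.foldl_congr_mem
  intro acc x _
  by_cases hx : x ∈ acc
  · simp [PySem.Set.add, PySem.Set.contains, hx]
  · simp [PySem.Set.add, PySem.Set.contains, hx]


-- counting helpers ------------------------------------------------------------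
-- number of i' < L with i' % n = j (closed form), for j < n
def pvCnt (n L j : Nat) : Nat := L / n + (if j < L % n then 1 else 0)

-- the lengths list computed by both ports
def pvLen (n L : Nat) : List Nat :=
  (List.range L).foldl (fun ls i => ls.set (i % n) (ls.getD (i % n) 0 + 1)) (List.replicate n 0)

lemma pvLen_length (n L : Nat) : (pvLen n L).length = n := by
  induction L with
  | zero => simp [pvLen]
  | succ L ih =>
      have hs : pvLen n (L+1) = (pvLen n L).set (L % n) ((pvLen n L).getD (L % n) 0 + 1) := by
        simp [pvLen, List.range_succ]
      rw [hs]
      simp [ih]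


lemma pvCnt_succ (n L j : Nat) (hn : 0 < n) (hj : j < n) :
    pvCnt n (L + 1) j = pvCnt n L j + (if j = L % n then 1 else 0) := by
  have hm : L % n < n := Nat.mod_lt _ hn
  by_cases hc : L % n + 1 < n
  · have h1 : 1 % n = 1 := Nat.mod_eq_of_lt (by omega)
    have hmod : (L + 1) % n = L % n + 1 := by
      rw [Nat.add_mod, h1, Nat.mod_eq_of_lt hc]
    have hndvd : ¬ n ∣ (L + 1) := by
      intro hd
      have h0 := Nat.mod_eq_zero_of_dvd hd
      omega
    have hdiv : (L + 1) / n = L / n := by rw [Nat.succ_div]; simp [hndvd]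
    simp only [pvCnt, hmod, hdiv]
    split_ifs <;> omega
  · have hc' : L % n + 1 = n := by omega
    have hmod : (L + 1) % n = 0 := by
      rcases Nat.eq_or_lt_of_le hn with h1 | h1
      · rw [← h1]; exact Nat.mod_one _
      · rw [Nat.add_mod, Nat.mod_eq_of_lt h1, hc']
        simp
    have hdvd : n ∣ (L + 1) := Nat.dvd_of_mod_eq_zero hmod
    have hdiv : (L + 1) / n = L / n + 1 := by rw [Nat.succ_div]; simp [hdvd]
    simp only [pvCnt, hmod, hdiv]
    split_ifs <;> omega


lemma pvLen_getD (n L j : Nat) (hn : 0 < n) (hj : j < n) :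
    (pvLen n L).getD j 0 = pvCnt n L j := by
  induction L with
  | zero =>
      simp [pvLen, pvCnt, List.getD_eq_getElem?_getD, hj]
  | succ L ih =>
      have hs : pvLen n (L+1) = (pvLen n L).set (L % n) ((pvLen n L).getD (L % n) 0 + 1) := by
        simp [pvLen, List.range_succ]
      have hlen : (pvLen n L).length = n := pvLen_length n L
      rw [hs, pvCnt_succ n L j hn hj]
      by_cases hjq : j = L % n
      · subst hjq
        rw [List.getD_eq_getElem?_getD, List.getElem?_set_self (by omega)]
        simp
        exact List.getD_eq_getElem?_getD.symm.trans ih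
      · rw [List.getD_eq_getElem?_getD, List.getElem?_set_ne (by omega)]
        rw [← List.getD_eq_getElem?_getD, ih]
        simp [hjq]


lemma pvCnt_mod_self (n i : Nat) : pvCnt n i (i % n) = i / n := by
  simp [pvCnt]


lemma pvDiv_lt_cnt (n i L : Nat) (_hn : 0 < n) (h : i < L) : i / n < pvCnt n L (i % n) := by
  have h1 := Nat.div_add_mod i n
  have h2 := Nat.div_add_mod L n
  have hle : i / n ≤ L / n := Nat.div_le_div_right (Nat.le_of_lt h)
  unfold pvCnt
  rcases Nat.lt_or_ge (i / n) (L / n) with hq | hq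
  · split_ifs <;> omega
  · have heq : L / n = i / n := Nat.le_antisymm hq hle
    rw [heq] at h2 ⊢
    generalize hQ : n * (i / n) = Q at h1 h2
    split_ifs <;> omega


lemma pvSum_cnt (n L : Nat) (hn : 0 < n) :
    ((List.range n).map (fun j => pvCnt n L j)).sum = L := by
  have hsplit : ∀ (l : List Nat) (f g : Nat → Nat),
      (l.map (fun j => f j + g j)).sum = (l.map f).sum + (l.map g).sum := by
    intro l f g
    induction l with
    | nil => simp
    | cons a t ih => simp [ih]; omega
  have hind : ∀ m : Nat, ((List.range m).map (fun j => if j < L % n then 1 else 0)).sum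
      = min (L % n) m := by
    intro m
    induction m with
    | zero => simp
    | succ m ih => rw [List.range_succ]; simp [ih]; split_ifs <;> omega
  unfold pvCnt
  rw [hsplit, hind]
  have hconst : ((List.range n).map (fun _ => L / n)).sum = n * (L / n) := by
    rw [List.map_const']
    simp [List.sum_replicate, smul_eq_mul]
  rw [hconst]
  have hm : L % n < n := Nat.mod_lt _ hn
  have hdm := Nat.div_add_mod L n
  generalize hQ : n * (L / n) = Q at hdm ⊢
  omega


-- index? on a nodup list ------------------------------------------------------
lemma pvIdx_getElem (r : List Int) (hnd : r.Nodup) (j : Nat) (hj : j < r.length) :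
    (PySem.List.index? r (r[j])).getD 0 = j := by
  have h : PySem.List.index? r (r[j]) = some j := by
    rw [PySem.List.index?_eq_some_iff]
    refine ⟨r.take j, r.drop (j+1), ?_, ?_, ?_⟩
    · conv_lhs => rw [← List.take_append_drop j r]
      rw [List.drop_eq_getElem_cons hj]
    · simp [List.length_take, Nat.le_of_lt hj]
    · intro hmem
      rcases List.mem_iff_getElem.mp hmem with ⟨i, hi, hie⟩
      have hij : i < j := by simp [List.length_take] at hi; omega
      have hilen : i < r.length := by omega
      rw [List.getElem_take] at hie
      have h3 : i = j := (List.Nodup.getElem_inj_iff hnd).mp hie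
      omega
  rw [h]
  rfl

lemma pvIdx_lt (r : List Int) (k : Int) (hk : k ∈ r) :
    (PySem.List.index? r k).getD 0 < r.length := by
  rcases Option.isSome_iff_exists.mp ((PySem.List.index?_isSome_iff r k).mpr hk) with ⟨i, hi⟩
  rcases PySem.List.getElem_of_index?_eq_some hi with ⟨hlt, _, _⟩
  rw [hi]
  exact hlt


lemma pvIdx_getD (r : List Int) (k : Int) (hk : k ∈ r) :
    r.getD ((PySem.List.index? r k).getD 0) 0 = k := by
  rcases Option.isSome_iff_exists.mp ((PySem.List.index?_isSome_iff r k).mpr hk) with ⟨i, hi⟩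
  rcases PySem.List.getElem_of_index?_eq_some hi with ⟨hlt, hget, _⟩
  rw [hi]
  simp only [Option.getD_some]
  rw [List.getD_eq_getElem?_getD, List.getElem?_eq_getElem hlt, Option.getD_some, hget]


-- set-fold helpers ------------------------------------------------------------
def pvSetFold {α : Type} (pv : List (Nat × α)) (init : List α) : List α :=
  pv.foldl (fun l q => l.set q.1 q.2) init

lemma pvSetFold_length {α : Type} (pv : List (Nat × α)) (init : List α) :
    (pvSetFold pv init).length = init.length := by
  induction pv generalizing init with
  | nil => rfl
  | cons a t ih =>
      show (pvSetFold t (init.set a.1 a.2)).length = init.length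
      rw [ih]
      simp


lemma pvSetFold_getD_not_mem {α : Type} (pv : List (Nat × α)) (init : List α) (j : Nat) (d : α)
    (h : j ∉ pv.map Prod.fst) : (pvSetFold pv init).getD j d = init.getD j d := by
  induction pv generalizing init with
  | nil => rfl
  | cons a t ih =>
      simp only [List.map_cons, List.mem_cons, not_or] at h
      show (pvSetFold t (init.set a.1 a.2)).getD j d = init.getD j d
      rw [ih _ h.2]
      rw [List.getD_eq_getElem?_getD, List.getD_eq_getElem?_getD,
        List.getElem?_set_ne (Ne.symm h.1)]


lemma pvSetFold_getD_mem {α : Type} (pv : List (Nat × α)) (init : List α) (j : Nat) (v d : α)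
    (hnd : (pv.map Prod.fst).Nodup) (hmem : (j, v) ∈ pv) (hj : j < init.length) :
    (pvSetFold pv init).getD j d = v := by
  induction pv generalizing init with
  | nil => simp at hmem
  | cons a t ih =>
      rcases a with ⟨a1, a2⟩
      simp only [List.map_cons, List.nodup_cons] at hnd
      rcases List.mem_cons.mp hmem with heq | hmem'
      · have hj1 : a1 = j := by rw [Prod.mk.injEq] at heq; exact heq.1.symm
        have hv : a2 = v := by rw [Prod.mk.injEq] at heq; exact heq.2.symm
        subst hj1; subst hv
        show (pvSetFold t (init.set a1 a2)).getD a1 d = a2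
        rw [pvSetFold_getD_not_mem _ _ _ _ hnd.1]
        rw [List.getD_eq_getElem?_getD, List.getElem?_set_self hj]
        rfl
      · show (pvSetFold t (init.set a1 a2)).getD j d = v
        exact ih _ hnd.2 hmem' (by simpa using hj)


-- pair lists built while walking the sorted key list --------------------------
def pvPairs (w idx : Int → Nat) : List Int → Nat → List (Nat × Nat)
  | [], _ => []
  | k :: t, p => (idx k, p) :: pvPairs w idx t (p + w k)

lemma pvPairs_map_fst (w idx : Int → Nat) (t : List Int) (p : Nat) :
    (pvPairs w idx t p).map Prod.fst = t.map idx := by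
  induction t generalizing p with
  | nil => rfl
  | cons k t ih => simp [pvPairs, ih]


lemma pvPairs_length (w idx : Int → Nat) (t : List Int) (p : Nat) :
    (pvPairs w idx t p).length = t.length := by
  induction t generalizing p with
  | nil => rfl
  | cons k t ih => simp [pvPairs, ih]


lemma pvPairs_getElem (w idx : Int → Nat) (t : List Int) (p i : Nat) (hi : i < t.length) :
    (pvPairs w idx t p)[i]'(by rw [pvPairs_length]; exact hi)
      = (idx t[i], p + ((t.take i).map w).sum) := by
  induction t generalizing p i with
  | nil => simp at hi
  | cons k t ih =>
      cases i with
      | zero => simp [pvPairs]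
      | succ i =>
          simp only [pvPairs, List.getElem_cons_succ]
          rw [ih _ _ (by simpa using hi)]
          simp [List.take_succ_cons, Nat.add_assoc]


-- B's offset-building loop ----------------------------------------------------
lemma pvPhaseB (w idx : Int → Nat) (t : List Int) (off : List Nat) (p : Nat) :
    t.foldl (fun (st : List Nat × Nat) k => (st.1.set (idx k) st.2, st.2 + w k)) (off, p)
      = (pvSetFold (pvPairs w idx t p) off, p + (t.map w).sum) := by
  induction t generalizing off p with
  | nil => simp [pvPairs, pvSetFold]
  | cons k t ih =>
      simp only [List.foldl_cons]
      rw [ih]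
      simp [pvPairs, pvSetFold, Nat.add_assoc]


-- A's slicing loop ------------------------------------------------------------
def pvBioList (cs : List Char) (w : Int → Nat) : List Int → Nat → List (List Char)
  | [], _ => []
  | k :: t, p => (cs.drop p).take (w k) :: pvBioList cs w t (p + w k)

lemma pvPhaseA1 (cs : List Char) (w : Int → Nat) (t : List Int) (p : Nat)
    (bio : List (List Char)) :
    t.foldl (fun (st : Nat × List (List Char)) k =>
        (st.1 + w k,
         st.2 ++ [PySem.List.slice cs (some (st.1 : Int)) (some ((st.1 : Int) + ((w k) : Int)))]))
      (p, bio)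
      = (p + (t.map w).sum, bio ++ pvBioList cs w t p) := by
  induction t generalizing p bio with
  | nil => simp [pvBioList]
  | cons k t ih =>
      simp only [List.foldl_cons]
      rw [ih]
      rw [PySem.List.slice_natCast_add]
      simp [pvBioList, Nat.add_assoc]



lemma pvBioList_eq_map (cs : List Char) (w idx : Int → Nat) (g : Nat → Nat)
    (hw : ∀ k, w k = g (idx k)) (t : List Int) (p : Nat) :
    pvBioList cs w t p
      = (pvPairs w idx t p).map (fun q => (cs.drop q.2).take (g q.1)) := by
  induction t generalizing p with
  | nil => rfl
  | cons k t ih => simp [pvBioList, pvPairs, ih, hw k]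


-- A's box-placing loop (fold over enumerate) ----------------------------------
def pvAPairs {α : Type} (idx : Int → Nat) (bio : List α) (d : α) : List Int → Nat → List (Nat × α)
  | [], _ => []
  | k :: t, m => (idx k, bio.getD m d) :: pvAPairs idx bio d t (m + 1)

lemma pvPhaseA2 {α : Type} (idx : Int → Nat) (bio : List α) (d : α) (t : List Int) (m : Nat)
    (lb : List α) :
    (PySem.List.enumerate t (m : Int)).foldl
        (fun lb p => lb.set (idx p.2) (bio.getD p.1.toNat d)) lb
      = pvSetFold (pvAPairs idx bio d t m) lb := by
  induction t generalizing m lb with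
  | nil => rfl
  | cons k t ih =>
      rw [PySem.List.enumerate_cons]
      simp only [List.foldl_cons]
      have hcast : (m : Int) + 1 = ((m + 1 : Nat) : Int) := by push_cast; ring
      rw [hcast, ih]
      simp [pvAPairs, pvSetFold, Int.toNat_natCast]


lemma pvAPairs_map_fst {α : Type} (idx : Int → Nat) (bio : List α) (d : α) (t : List Int) (m : Nat) :
    (pvAPairs idx bio d t m).map Prod.fst = t.map idx := by
  induction t generalizing m with
  | nil => rfl
  | cons k t ih => simp [pvAPairs, ih]


lemma pvAPairs_length {α : Type} (idx : Int → Nat) (bio : List α) (d : α) (t : List Int)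
    (m : Nat) : (pvAPairs idx bio d t m).length = t.length := by
  induction t generalizing m with
  | nil => rfl
  | cons k t ih => simp [pvAPairs, ih]

lemma pvAPairs_getElem {α : Type} (idx : Int → Nat) (bio : List α) (d : α) (t : List Int)
    (m i : Nat) (hi : i < t.length) :
    (pvAPairs idx bio d t m)[i]'(by rw [pvAPairs_length]; exact hi) = (idx t[i], bio.getD (m + i) d) := by
  induction t generalizing m i with
  | nil => simp at hi
  | cons k t ih =>
      cases i with
      | zero => simp [pvAPairs]
      | succ i =>
          simp only [pvAPairs, List.getElem_cons_succ]
          rw [ih _ _ (by simpa using hi)]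
          simp [Nat.add_assoc, Nat.add_comm 1 i]


-- small list facts ------------------------------------------------------------
lemma pvTail_take {α : Type} (l : List α) (m : Nat) :
    (l.take m).tail = l.tail.take (m - 1) := by
  cases l with
  | nil => simp
  | cons a t =>
      cases m with
      | zero => simp
      | succ m => simp



lemma pvHeadD_drop {α : Type} (l : List α) (p : Nat) (d : α) :
    (l.drop p).headD d = l.getD p d := by
  induction l generalizing p with
  | nil => cases p <;> simp
  | cons a t ih =>
      cases p with
      | zero => simp
      | succ p => exact ih p


lemma pvHeadD_take {α : Type} (l : List α) (m : Nat) (hm : 0 < m) (d : α) :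
    (l.take m).headD d = l.headD d := by
  cases m with
  | zero => omega
  | succ m => cases l <;> simp


lemma pvSet_map_range {α : Type} (n q : Nat) (f : Nat → α) (v : α) (hq : q < n) :
    ((List.range n).map f).set q v
      = (List.range n).map (fun j => if j = q then v else f j) := by
  apply List.ext_getElem
  · simp
  · intro j hj1 hj2
    simp only [List.getElem_set, List.getElem_map, List.getElem_range]
    by_cases hjq : j = q
    · subst hjq; simp
    · simp [hjq, Ne.symm hjq]


lemma pvGetD_map_range {α : Type} (n j : Nat) (f : Nat → α) (d : α) (hj : j < n) :
    ((List.range n).map f).getD j d = f j := by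
  rw [List.getD_eq_getElem?_getD, List.getElem?_map, List.getElem?_range hj]
  rfl


-- the round-robin pop loop of A -----------------------------------------------
lemma pvPopLoop (n : Nat) (hn : 0 < n) (cs : List Char) (off : Nat → Nat)
    (lb : List (List Char)) (hlen : lb.length = n)
    (hbox : ∀ j, j < n → lb.getD j [] = (cs.drop (off j)).take (pvCnt n cs.length j))
    (hbound : ∀ j, j < n → off j + pvCnt n cs.length j ≤ cs.length) :
    ∀ i, i ≤ cs.length →
      (List.range i).foldl
          (fun (st : List (List Char) × List Char) i' =>
            (st.1.set (i' % n) (st.1.getD (i' % n) []).tail,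
             st.2 ++ [(st.1.getD (i' % n) []).headD ' ']))
          (lb, [])
        = ((List.range n).map
              (fun j => (cs.drop (off j + pvCnt n i j)).take (pvCnt n cs.length j - pvCnt n i j)),
           (List.range i).map (fun i' => cs.getD (off (i' % n) + i' / n) ' ')) := by
  intro i
  induction i with
  | zero =>
      intro _
      simp only [List.range_zero, List.foldl_nil, List.map_nil, Prod.mk.injEq]
      refine ⟨?_, trivial⟩
      apply List.ext_getElem
      · simp [hlen]
      · intro j hj1 hj2
        have hjn : j < n := by simpa [hlen] using hj1
        have hb := hbox j hjn
        rw [List.getD_eq_getElem?_getD, List.getElem?_eq_getElem hj1, Option.getD_some] at hb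
        simp only [List.getElem_map, List.getElem_range]
        rw [hb]
        simp [pvCnt]
  | succ i ih =>
      intro hi1
      have hiL : i < cs.length := by omega
      have hinv := ih (by omega)
      rw [List.range_succ, List.foldl_append, hinv]
      simp only [List.foldl_cons, List.foldl_nil]
      have hqn : i % n < n := Nat.mod_lt _ hn
      have hdiv : i / n < pvCnt n cs.length (i % n) := pvDiv_lt_cnt n i cs.length hn hiL
      have hbnd : off (i % n) + pvCnt n cs.length (i % n) ≤ cs.length := hbound _ hqn
      have hcur : ((List.range n).map
            (fun j => (cs.drop (off j + pvCnt n i j)).take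
              (pvCnt n cs.length j - pvCnt n i j))).getD (i % n) []
          = (cs.drop (off (i % n) + i / n)).take (pvCnt n cs.length (i % n) - i / n) := by
        rw [pvGetD_map_range _ _ _ _ hqn, pvCnt_mod_self]
      rw [hcur]
      have hlenpos : 0 < pvCnt n cs.length (i % n) - i / n := by omega
      have hhead : ((cs.drop (off (i % n) + i / n)).take
            (pvCnt n cs.length (i % n) - i / n)).headD ' '
          = cs.getD (off (i % n) + i / n) ' ' := by
        rw [pvHeadD_take _ _ hlenpos, pvHeadD_drop]
      have htail : ((cs.drop (off (i % n) + i / n)).take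
            (pvCnt n cs.length (i % n) - i / n)).tail
          = (cs.drop (off (i % n) + (i / n + 1))).take
              (pvCnt n cs.length (i % n) - (i / n + 1)) := by
        rw [pvTail_take, List.tail_drop]
        have h1 : off (i % n) + i / n + 1 = off (i % n) + (i / n + 1) := by omega
        have h2 : pvCnt n cs.length (i % n) - i / n - 1
            = pvCnt n cs.length (i % n) - (i / n + 1) := by omega
        rw [h1, h2]
      rw [hhead, htail]
      rw [pvSet_map_range _ _ _ _ hqn]
      simp only [Prod.mk.injEq]
      constructor
      · apply List.map_congr_left
        intro j hjmem
        have hjn : j < n := List.mem_range.mp hjmem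
        rw [pvCnt_succ n i j hn hjn]
        by_cases hjq : j = i % n
        · subst hjq
          simp [pvCnt_mod_self]
        · simp [hjq]
      · rw [List.map_append]
        rfl

-- normal forms of the two port bodies (definitionally equal to the ports) ------
def pvIdxF (r : List Int) (k : Int) : Nat := (PySem.List.index? r k).getD 0

def pvW (cs : List Char) (r : List Int) (k : Int) : Nat :=
  (pvLen r.length cs.length).getD (pvIdxF r k) 0

def pvS (r : List Int) : List Int := PySem.List.sorted r (fun x => x) false

def pvABody (cs : List Char) (r : List Int) : List Char :=
  ((List.range cs.length).foldl
    (fun (st : List (List Char) × List Char) i =>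
      (st.1.set (i % r.length) (st.1.getD (i % r.length) []).tail,
       st.2 ++ [(st.1.getD (i % r.length) []).headD ' ']))
    ((PySem.List.enumerate (pvS r) ((0 : Nat) : Int)).foldl
      (fun lb p => lb.set (pvIdxF r p.2)
        ((((pvS r).foldl
            (fun (st : Nat × List (List Char)) k =>
              (st.1 + pvW cs r k,
               st.2 ++ [PySem.List.slice cs (some (st.1 : Int))
                 (some ((st.1 : Int) + ((pvW cs r k) : Int)))]))
            (0, [])).2).getD p.1.toNat []))
      (List.replicate r.length []), [])).2

def pvBBody (cs : List Char) (r : List Int) : List Char :=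
  (List.range cs.length).map
    (fun i => cs.getD
      ((((pvS r).foldl
          (fun (st : List Nat × Nat) k => (st.1.set (pvIdxF r k) st.2, st.2 + pvW cs r k))
          (List.replicate r.length 0, 0)).1.getD (i % r.length) 0) + i / r.length) ' ')

lemma pvA_eq (c : String) (k : List Int) :
    inverse_rearrange c k
      = String.ofList (pvABody c.toList
          (k.foldl (fun acc x => if x ∈ acc then acc else acc ++ [x]) [])) := rfl

lemma pvB_eq (c : String) (k : List Int) :
    inverse_rearrange_alt c k
      = String.ofList (pvBBody c.toList (PySem.List.dedup k)) := rfl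

lemma pvCore (cs : List Char) (r : List Int) (hnd : r.Nodup) (hr : r ≠ []) :
    pvABody cs r = pvBBody cs r := by
  have hn : 0 < r.length := List.length_pos_of_ne_nil hr
  have hsp : (pvS r).Perm r := PySem.List.sorted_perm r (fun x => x) false
  have hslen : (pvS r).length = r.length := hsp.length_eq
  have hsnd : (pvS r).Nodup := hsp.nodup_iff.mpr hnd
  have hsmem : ∀ k, k ∈ pvS r ↔ k ∈ r := fun k => hsp.mem_iff
  have hidx_lt : ∀ k ∈ r, pvIdxF r k < r.length := fun k hk => pvIdx_lt r k hk
  have hmapnd : ((pvS r).map (pvIdxF r)).Nodup := by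
    apply List.Nodup.map_on ?_ hsnd
    intro x hx y hy hxy
    have hx' : x ∈ r := (hsmem x).mp hx
    have hy' : y ∈ r := (hsmem y).mp hy
    have h1 : r.getD (pvIdxF r x) 0 = x := pvIdx_getD r x hx'
    have h2 : r.getD (pvIdxF r y) 0 = y := pvIdx_getD r y hy'
    rw [← h1, ← h2, hxy]
  have hperm_range : ((pvS r).map (pvIdxF r)).Perm (List.range r.length) := by
    apply List.Subperm.perm_of_length_le
    · apply List.subperm_of_subset hmapnd
      intro v hv
      rcases List.mem_map.mp hv with ⟨k, hk, rfl⟩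
      exact List.mem_range.mpr (hidx_lt k ((hsmem k).mp hk))
    · simp [hslen]
  have hsum : ((pvS r).map (pvW cs r)).sum = cs.length := by
    have h1 : (pvS r).map (pvW cs r)
        = ((pvS r).map (pvIdxF r)).map (fun j => (pvLen r.length cs.length).getD j 0) := by
      rw [List.map_map]; rfl
    rw [h1, List.Perm.sum_eq (hperm_range.map _)]
    have h2 : (List.range r.length).map (fun j => (pvLen r.length cs.length).getD j 0)
        = (List.range r.length).map (fun j => pvCnt r.length cs.length j) := by
      apply List.map_congr_left
      intro j hj
      exact pvLen_getD _ _ _ hn (List.mem_range.mp hj)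
    rw [h2, pvSum_cnt _ _ hn]
  have hkey : ∀ j, j < r.length → ∃ i, ∃ hi : i < (pvS r).length,
      pvIdxF r ((pvS r)[i]) = j ∧
      (((pvS r).take i).map (pvW cs r)).sum + pvCnt r.length cs.length j ≤ cs.length := by
    intro j hj
    have hmem : r[j] ∈ pvS r := (hsmem _).mpr (List.getElem_mem hj)
    rcases List.mem_iff_getElem.mp hmem with ⟨i, hi, hie⟩
    have hij : pvIdxF r ((pvS r)[i]) = j := by rw [hie]; exact pvIdx_getElem r hnd j hj
    have hw_i : pvW cs r ((pvS r)[i]) = pvCnt r.length cs.length j := by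
      show (pvLen r.length cs.length).getD (pvIdxF r ((pvS r)[i])) 0 = _
      rw [hij]
      exact pvLen_getD _ _ _ hn hj
    refine ⟨i, hi, hij, ?_⟩
    have hsplit : pvS r = (pvS r).take i ++ (pvS r)[i] :: (pvS r).drop (i+1) := by
      conv_lhs => rw [← List.take_append_drop i (pvS r)]
      rw [List.drop_eq_getElem_cons hi]
    have htot : (((pvS r).take i).map (pvW cs r)).sum + pvW cs r ((pvS r)[i])
        + (((pvS r).drop (i+1)).map (pvW cs r)).sum = cs.length := by
      rw [← hsum]
      conv_rhs => rw [hsplit]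
      rw [List.map_append, List.sum_append, List.map_cons, List.sum_cons]
      omega
    rw [hw_i] at htot
    omega
  -- B's offset list
  have hB : ((pvS r).foldl
        (fun (st : List Nat × Nat) k => (st.1.set (pvIdxF r k) st.2, st.2 + pvW cs r k))
        (List.replicate r.length 0, 0))
      = (pvSetFold (pvPairs (pvW cs r) (pvIdxF r) (pvS r) 0) (List.replicate r.length 0),
         0 + ((pvS r).map (pvW cs r)).sum) :=
    pvPhaseB _ _ _ _ _
  set off := pvSetFold (pvPairs (pvW cs r) (pvIdxF r) (pvS r) 0) (List.replicate r.length 0)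
    with hoff_def
  have hoffval : ∀ j, j < r.length → ∀ i, ∀ hi : i < (pvS r).length,
      pvIdxF r ((pvS r)[i]) = j →
      off.getD j 0 = (((pvS r).take i).map (pvW cs r)).sum := by
    intro j hj i hi hij
    rw [hoff_def]
    apply pvSetFold_getD_mem
    · rw [pvPairs_map_fst]; exact hmapnd
    · have hp := pvPairs_getElem (pvW cs r) (pvIdxF r) (pvS r) 0 i hi
      rw [hij, Nat.zero_add] at hp
      have hm := List.getElem_mem (by rw [pvPairs_length]; exact hi :
          i < (pvPairs (pvW cs r) (pvIdxF r) (pvS r) 0).length)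
      rw [hp] at hm
      exact hm
    · simp [hj]
  -- A's bio list and letter boxes
  have hbioval : ∀ j, j < r.length → ∀ i, ∀ hi : i < (pvS r).length,
      pvIdxF r ((pvS r)[i]) = j →
      (pvBioList cs (pvW cs r) (pvS r) 0).getD i []
        = (cs.drop (off.getD j 0)).take (pvCnt r.length cs.length j) := by
    intro j hj i hi hij
    rw [pvBioList_eq_map cs (pvW cs r) (pvIdxF r)
      (fun j => (pvLen r.length cs.length).getD j 0) (fun k => rfl)]
    rw [List.getD_eq_getElem?_getD,
      List.getElem?_eq_getElem (by rw [List.length_map, pvPairs_length]; exact hi),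
      Option.getD_some, List.getElem_map, pvPairs_getElem _ _ _ _ _ hi]
    rw [hij, Nat.zero_add]
    rw [hoffval j hj i hi hij]
    rw [pvLen_getD _ _ _ hn hj]
  have hA2 : (PySem.List.enumerate (pvS r) ((0 : Nat) : Int)).foldl
      (fun lb p => lb.set (pvIdxF r p.2)
        ((pvBioList cs (pvW cs r) (pvS r) 0).getD p.1.toNat [])) (List.replicate r.length [])
      = pvSetFold (pvAPairs (pvIdxF r) (pvBioList cs (pvW cs r) (pvS r) 0) [] (pvS r) 0)
          (List.replicate r.length []) := pvPhaseA2 _ _ _ _ _ _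
  set lb := pvSetFold (pvAPairs (pvIdxF r) (pvBioList cs (pvW cs r) (pvS r) 0) [] (pvS r) 0)
      (List.replicate r.length []) with hlb_def
  have hlblen : lb.length = r.length := by rw [hlb_def, pvSetFold_length]; simp
  have hbox : ∀ j, j < r.length →
      lb.getD j [] = (cs.drop (off.getD j 0)).take (pvCnt r.length cs.length j) := by
    intro j hj
    rcases hkey j hj with ⟨i, hi, hij, _⟩
    have hv := pvSetFold_getD_mem
      (pvAPairs (pvIdxF r) (pvBioList cs (pvW cs r) (pvS r) 0) [] (pvS r) 0)
      (List.replicate r.length []) j ((pvBioList cs (pvW cs r) (pvS r) 0).getD i []) []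
      (by rw [pvAPairs_map_fst]; exact hmapnd)
      (by
        have hp := pvAPairs_getElem (pvIdxF r) (pvBioList cs (pvW cs r) (pvS r) 0) []
          (pvS r) 0 i hi
        rw [hij, Nat.zero_add] at hp
        have hm := List.getElem_mem (by rw [pvAPairs_length]; exact hi :
          i < (pvAPairs (pvIdxF r) (pvBioList cs (pvW cs r) (pvS r) 0) [] (pvS r) 0).length)
        rw [hp] at hm
        exact hm)
      (by simp [hj])
    rw [← hlb_def] at hv
    rw [hv]
    exact hbioval j hj i hi hij
  have hbound : ∀ j, j < r.length →
      off.getD j 0 + pvCnt r.length cs.length j ≤ cs.length := by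
    intro j hj
    rcases hkey j hj with ⟨i, hi, hij, hle⟩
    rw [hoffval j hj i hi hij]
    exact hle
  unfold pvABody pvBBody
  rw [pvPhaseA1]
  simp only [List.nil_append]
  rw [hA2]
  rw [pvPopLoop r.length hn cs (fun j => off.getD j 0) lb hlblen hbox hbound
    cs.length (le_refl _)]
  rw [hB]

-- main equality on non-empty key lists ---------------------------------------
lemma pvMain (ciphertext : String) (keyNums : List Int) (hk : keyNums ≠ []) :
    inverse_rearrange ciphertext keyNums = inverse_rearrange_alt ciphertext keyNums := by
  rw [pvA_eq, pvB_eq, pvDedup_fold]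
  congr 1
  apply pvCore
  · exact PySem.List.nodup_dedup keyNums
  · intro h
    apply hk
    cases keyNums with
    | nil => rfl
    | cons a t =>
        exfalso
        have : a ∈ PySem.List.dedup (a :: t) :=
          (PySem.List.mem_dedup _ _).mpr List.mem_cons_self
        rw [h] at this
        simp at this



-- ===== VERDICT (by name: the statement is the Claim_ definition above) =====
theorem inverse_rearrange_spec : Claim_equal_inverse_rearrange := by
  intro ciphertext keyNums _ hpre
  unfold Spec_inverse_rearrange
  by_cases hk : keyNums = []
  · subst hk
    have hc : ciphertext = "" := hpre rfl
    subst hc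
    rfl
  · exact pvMain ciphertext keyNums hk
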